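-- pv_equiv track=rewrite | github.com/shikgom2/boj | test.py | min_cost_to_form_string
-- ===== SOURCE A (Python) =====
-- def min_cost_to_form_string(t, bags):
--     n = len(t)
--     dp = [[float('inf')] * (n + 1) for _ in range(len(bags) + 1)]
--     dp[0][0] = 0  # Base case: cost of forming empty string is 0
--
--     for i in range(1, len(bags) + 1):
--         for j in range(n + 1):
--             # Case 1: Skip the current bag
--             dp[i][j] = min(dp[i][j], dp[i-1][j])
--             # Case 2: Use a string from the current bag
--             for string in bags[i-1]:
--                 if j + len(string) <= n and t.startswith(string, j):
--                     dp[i][j + len(string)] = min(dp[i][j + len(string)], dp[i-1][j] + 1)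
--
--     return dp[len(bags)][n] if dp[len(bags)][n] != float('inf') else -1
-- ===== SOURCE B (Python) =====
-- def min_cost_to_form_string(t, bags):
--     # BFS over cost levels (Dijkstra with unit weights, state-compressed): for each
--     # cost level c keep, per position j, the EARLIEST bag index from which we may
--     # still continue; the answer is the first level at which position n appears.
--     n, B = len(t), len(bags)
--     r = {0: 0}  # position -> least number of bags consumed to reach it at cost <= current level
--     for c in range(B + 1):
--         if n in r:
--             return c
--         nr = dict(r)
--         for j, i0 in r.items():
--             for b in range(i0, B):
--                 for s in bags[b]:
--                     k = j + len(s)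
--                     if k <= n and t.startswith(s, j):
--                         if k not in nr or b + 1 < nr[k]:
--                             nr[k] = b + 1
--         r = nr
--     return -1
-- ===== Notes on version B (the rewrite author's own statement) =====
-- stated objective: alternative
-- what changed: Replaces A's layered DP over (bag index, position) storing min cost per cell by a BFS over COST LEVELS (unit-weight Dijkstra with state compression): per level c it keeps, for each position, the earliest bag index from which one may still continue, and returns the first level at which position n becomes reachable.
import Mathlib
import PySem

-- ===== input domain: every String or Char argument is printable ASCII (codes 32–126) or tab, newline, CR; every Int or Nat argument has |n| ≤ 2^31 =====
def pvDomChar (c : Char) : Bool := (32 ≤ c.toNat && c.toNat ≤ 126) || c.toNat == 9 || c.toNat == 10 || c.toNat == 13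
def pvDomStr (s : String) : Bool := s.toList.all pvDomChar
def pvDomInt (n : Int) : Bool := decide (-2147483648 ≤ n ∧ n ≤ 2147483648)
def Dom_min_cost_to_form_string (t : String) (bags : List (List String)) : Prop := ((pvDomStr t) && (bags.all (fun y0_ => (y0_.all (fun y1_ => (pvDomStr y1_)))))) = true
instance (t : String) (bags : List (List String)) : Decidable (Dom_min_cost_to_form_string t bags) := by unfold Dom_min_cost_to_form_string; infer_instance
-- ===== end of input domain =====

-- B replaces A's layered min-cost DP table over (bag index, position) by a BFS over cost
-- levels (unit-weight Dijkstra with state compression: per level, each position keeps the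
-- earliest bag index from which one may continue); objective: alternative algorithm.

-- ===== PORT A =====
-- Python's float('inf') sentinel is represented by `none`; all finite dp entries are ints.
def omin : Option Int → Option Int → Option Int
  | none, b => b
  | some a, none => some a
  | some a, some b => some (min a b)

def get2 (dp : List (List (Option Int))) (i j : Nat) : Option Int := (dp.getD i []).getD j none

def set2 (dp : List (List (Option Int))) (i j : Nat) (v : Option Int) : List (List (Option Int)) :=
  dp.set i ((dp.getD i []).set j v)

-- body of A's `for j in range(n+1)` loop (case 1 skip, then scatter over the bag);
-- `t.startswith(string, j)` is ported as take/drop on the char list, exact for 0 ≤ j.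
def aBody (cs : List Char) (n i : Nat) (bag : List String) (dp : List (List (Option Int))) (j : Nat) :
    List (List (Option Int)) :=
  let dp := set2 dp i j (omin (get2 dp i j) (get2 dp (i-1) j))
  bag.foldl (fun dp s =>
    if j + s.toList.length ≤ n ∧ (cs.drop j).take s.toList.length = s.toList then
      set2 dp i (j + s.toList.length)
        (omin (get2 dp i (j + s.toList.length)) ((get2 dp (i-1) j).map (· + 1)))
    else dp) dp

def min_cost_to_form_string (t : String) (bags : List (List String)) : Int :=
  let cs := t.toList
  let n := cs.length
  let dp0 := set2 (List.replicate (bags.length + 1) (List.replicate (n + 1) (none : Option Int))) 0 0 (some 0)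
  let dpN := (List.range bags.length).foldl
    (fun dp m => (List.range (n + 1)).foldl (aBody cs n (m + 1) (bags.getD m [])) dp) dp0
  match get2 dpN bags.length n with
  | some c => c
  | none => -1

-- ===== PORT B =====
-- inner loop `for s in bags[b]` with the min-update `if k not in nr or b+1 < nr[k]`
def bInner (cs : List Char) (n j b : Nat) (bag : List String) (nr : PySem.Dict Nat Nat) :
    PySem.Dict Nat Nat :=
  bag.foldl (fun nr s =>
    if j + s.toList.length ≤ n ∧ (cs.drop j).take s.toList.length = s.toList then
      match PySem.Dict.get? nr (j + s.toList.length) with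
      | none => nr.insert (j + s.toList.length) (b + 1)
      | some w => if b + 1 < w then nr.insert (j + s.toList.length) (b + 1) else nr
    else nr) nr

-- one BFS level: from `r` (position ↦ earliest usable bag index at cost ≤ c) build the
-- same map for cost ≤ c+1 (`nr = dict(r)`, then the loops over items/bags/strings)
def bStep (cs : List Char) (n BN : Nat) (bags : List (List String)) (r : PySem.Dict Nat Nat) :
    PySem.Dict Nat Nat :=
  r.items.foldl (fun nr ji =>
    (List.range' ji.2 (BN - ji.2)).foldl (fun nr b => bInner cs n ji.1 b (bags.getD b []) nr) nr) r

-- `for c in range(B+1): if n in r: return c; r = <next level>`, then `return -1`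
def bIter (cs : List Char) (n BN : Nat) (bags : List (List String)) :
    Nat → Nat → PySem.Dict Nat Nat → Int
  | 0, _, _ => -1
  | fuel + 1, c, r =>
    if (PySem.Dict.get? r n).isSome then (c : Int)
    else bIter cs n BN bags fuel (c + 1) (bStep cs n BN bags r)

def min_cost_to_form_string_alt (t : String) (bags : List (List String)) : Int :=
  let cs := t.toList
  bIter cs cs.length bags.length bags (bags.length + 1) 0 ((PySem.Dict.empty).insert 0 0)

-- ===== PRECONDITION & SPEC =====
def Spec_min_cost_to_form_string (t : String) (bags : List (List String)) (out : Int) : Prop := out = min_cost_to_form_string_alt t bags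
instance (t : String) (bags : List (List String)) (out : Int) : Decidable (Spec_min_cost_to_form_string t bags out) := by unfold Spec_min_cost_to_form_string; infer_instance

-- ===== CLAIM (what is proved, stated in full; the proofs are below) =====
def Claim_equal_min_cost_to_form_string : Prop := ∀ (t : String) (bags : List (List String)), Dom_min_cost_to_form_string t bags → Spec_min_cost_to_form_string t bags (min_cost_to_form_string t bags)

-- ===== LEMMAS AND PROOFS =====

lemma bool_eq_of_iff {a b : Bool} (h : a = true ↔ b = true) : a = b := by
  cases a <;> cases b <;> simp_all

-- ----- algebra of min-with-infinity (none = float('inf')) -----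
lemma omin_none_right (a : Option Int) : omin a none = a := by cases a <;> rfl

lemma omin_assoc (a b c : Option Int) : omin (omin a b) c = omin a (omin b c) := by
  cases a <;> cases b <;> cases c <;> simp [omin, min_assoc]

lemma omin_comm (a b : Option Int) : omin a b = omin b a := by
  cases a <;> cases b <;> simp [omin, min_comm]

lemma omin_left_comm (a b c : Option Int) : omin a (omin b c) = omin b (omin a c) := by
  rw [← omin_assoc, omin_comm a b, omin_assoc]

-- a fold that omin-accumulates g s over the strings satisfying p
def ominFold (bag : List String) (p : String → Bool) (g : String → Option Int) (a : Option Int) : Option Int :=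
  bag.foldl (fun acc s => if p s then omin acc (g s) else acc) a

lemma ominFold_cons (s : String) (rest : List String) (p : String → Bool) (g : String → Option Int)
    (a : Option Int) : ominFold (s :: rest) p g a = ominFold rest p g (if p s then omin a (g s) else a) := rfl

lemma ominFold_pull (bag : List String) (p : String → Bool) (g : String → Option Int) (a : Option Int) :
    ominFold bag p g a = omin a (ominFold bag p g none) := by
  induction bag generalizing a with
  | nil => exact (omin_none_right a).symm
  | cons s rest ih =>
    rw [ominFold_cons, ominFold_cons]
    by_cases h : p s = true
    · simp only [h, if_true]
      rw [ih (omin a (g s)), ih (omin none (g s)), omin_assoc]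
      rfl
    · simp only [h]
      exact ih a

lemma ominFold_congr (bag : List String) (p q : String → Bool) (g g' : String → Option Int)
    (a : Option Int) (h : ∀ s ∈ bag, p s = q s ∧ (p s = true → g s = g' s)) :
    ominFold bag p g a = ominFold bag q g' a := by
  induction bag generalizing a with
  | nil => rfl
  | cons s rest ih =>
    rw [ominFold_cons, ominFold_cons]
    have hs := h s (by simp)
    rw [← hs.1]
    by_cases hp : p s = true
    · rw [if_pos hp, if_pos hp, hs.2 hp]
      exact ih _ (fun x hx => h x (by simp [hx]))
    · rw [if_neg hp, if_neg hp]
      exact ih _ (fun x hx => h x (by simp [hx]))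

lemma ominFold_false (bag : List String) (p : String → Bool) (g : String → Option Int)
    (a : Option Int) (h : ∀ s ∈ bag, p s = false) : ominFold bag p g a = a := by
  induction bag generalizing a with
  | nil => rfl
  | cons s rest ih =>
    rw [ominFold_cons]
    have hs := h s (by simp)
    simp only [hs, Bool.false_eq_true, if_false]
    exact ih a (fun x hx => h x (by simp [hx]))

lemma ominFold_split (bag : List String) (p q pq : String → Bool) (g : String → Option Int)
    (h : ∀ s ∈ bag, pq s = (p s || q s) ∧ ¬(p s = true ∧ q s = true)) :
    ominFold bag pq g none = omin (ominFold bag p g none) (ominFold bag q g none) := by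
  induction bag with
  | nil => rfl
  | cons s rest ih =>
    have hs := h s (by simp)
    have ih' := ih (fun x hx => h x (by simp [hx]))
    rw [ominFold_cons, ominFold_cons, ominFold_cons, hs.1]
    cases hp : p s with
    | false =>
      cases hq : q s with
      | false =>
        simp only [Bool.or_false, Bool.false_eq_true, if_false]
        exact ih'
      | true =>
        simp only [Bool.or_true, if_true, Bool.false_eq_true, if_false]
        rw [ominFold_pull rest pq g (omin none (g s)), ominFold_pull rest q g (omin none (g s)), ih']
        rw [omin_left_comm]
    | true =>
      cases hq : q s with
      | false =>
        simp only [Bool.true_or, if_true, Bool.false_eq_true, if_false]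
        rw [ominFold_pull rest pq g (omin none (g s)), ominFold_pull rest p g (omin none (g s)), ih']
        rw [← omin_assoc]
      | true => exact absurd ⟨hp, hq⟩ hs.2

-- ----- the common DP layer (gather form) -----
def matchB (cs : List Char) (j : Nat) (s : String) : Bool :=
  decide ((cs.drop j).take s.toList.length = s.toList)

def condR (cs : List Char) (k : Nat) (s : String) : Bool :=
  decide (s.toList.length ≤ k) && matchB cs (k - s.toList.length) s

def gVal (prev : Nat → Option Int) (k : Nat) (s : String) : Option Int :=
  (prev (k - s.toList.length)).map (· + 1)

def relax (cs : List Char) (prev : Nat → Option Int) (bag : List String) (k : Nat) : Option Int :=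
  ominFold bag (condR cs k) (gVal prev k) (prev k)

def initF : Nat → Option Int := fun k => if k = 0 then some 0 else none

lemma relax_congr (cs : List Char) (prev prev' : Nat → Option Int) (bag : List String) (k : Nat)
    (h : ∀ j ≤ k, prev j = prev' j) : relax cs prev bag k = relax cs prev' bag k := by
  unfold relax
  rw [h k le_rfl]
  exact ominFold_congr bag _ _ _ _ _
    (fun s _ => ⟨rfl, fun _ => by unfold gVal; rw [h _ (Nat.sub_le k _)]⟩)

-- ----- list set/get helpers -----
lemma getD_set_ne {α : Type} (l : List α) {i j : Nat} (h : i ≠ j) (v d : α) :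
    (l.set i v).getD j d = l.getD j d := by
  simp [List.getD_eq_getElem?_getD, h]

lemma getD_set_self {α : Type} (l : List α) {i : Nat} (h : i < l.length) (v d : α) :
    (l.set i v).getD i d = v := by
  simp [List.getD_eq_getElem?_getD, h]

lemma set_getD_self {α : Type} (l : List α) {i : Nat} (h : i < l.length) (d : α) :
    l.set i (l.getD i d) = l := by
  apply List.ext_getElem?
  intro k
  by_cases hk : i = k
  · subst hk
    simp [List.getD_eq_getElem?_getD, h]
  · simp [hk]

-- ----- A side: the scatter pass over one row equals the gather form -----
def condA (cs : List Char) (j0 k : Nat) (s : String) : Bool :=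
  decide (j0 + s.toList.length = k) && matchB cs j0 s

def condG (cs : List Char) (j0 k : Nat) (s : String) : Bool :=
  decide (s.toList.length ≤ k) && decide (k - s.toList.length < j0) && matchB cs (k - s.toList.length) s

def gath (cs : List Char) (prev : Nat → Option Int) (bag : List String) (j0 k : Nat) : Option Int :=
  ominFold bag (condG cs j0 k) (gVal prev k) none

lemma scat (cs : List Char) (n : Nat) (prev : Nat → Option Int) (j0 : Nat) (bag : List String) :
    ∀ (row : List (Option Int)), row.length = n + 1 → ∀ k, k ≤ n →
    (bag.foldl (fun row s =>
        if j0 + s.toList.length ≤ n ∧ (cs.drop j0).take s.toList.length = s.toList then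
          row.set (j0 + s.toList.length)
            (omin (row.getD (j0 + s.toList.length) none) ((prev j0).map (· + 1)))
        else row) row).getD k none
      = omin (row.getD k none) (ominFold bag (condA cs j0 k) (fun _ => (prev j0).map (· + 1)) none) := by
  induction bag with
  | nil => intro row _ k _; exact (omin_none_right _).symm
  | cons s rest ih =>
    intro row hrow k hk
    rw [List.foldl_cons, ominFold_cons]
    by_cases hc : (j0 + s.toList.length ≤ n ∧ (cs.drop j0).take s.toList.length = s.toList)
    · rw [if_pos hc]
      by_cases hkp : j0 + s.toList.length = k
      · have hca : condA cs j0 k s = true := by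
          simp only [condA, matchB, Bool.and_eq_true, decide_eq_true_eq]
          exact ⟨hkp, hc.2⟩
        simp only [hca, if_true]
        rw [ih _ (by rw [List.length_set]; exact hrow) k hk]
        rw [hkp, getD_set_self row (by omega)]
        rw [ominFold_pull rest (condA cs j0 k) (fun _ => (prev j0).map (· + 1))
          (omin none ((prev j0).map (· + 1))), omin_assoc]
        rfl
      · have hca : condA cs j0 k s = false := by
          simp only [condA, Bool.and_eq_false_iff, decide_eq_false_iff_not]
          exact Or.inl hkp
        simp only [hca, Bool.false_eq_true, if_false]
        rw [ih _ (by rw [List.length_set]; exact hrow) k hk]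
        rw [getD_set_ne row hkp]
    · rw [if_neg hc]
      have hca : condA cs j0 k s = false := by
        simp only [condA, matchB, Bool.and_eq_false_iff, decide_eq_false_iff_not]
        by_cases hpk : j0 + s.toList.length = k
        · exact Or.inr (fun hm => hc ⟨by omega, hm⟩)
        · exact Or.inl hpk
      simp only [hca, Bool.false_eq_true, if_false]
      exact ih row hrow k hk

lemma scat_len (cs : List Char) (n : Nat) (prev : Nat → Option Int) (j0 : Nat) :
    ∀ (bag : List String) (row : List (Option Int)),
    (bag.foldl (fun row s =>
        if j0 + s.toList.length ≤ n ∧ (cs.drop j0).take s.toList.length = s.toList then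
          row.set (j0 + s.toList.length)
            (omin (row.getD (j0 + s.toList.length) none) ((prev j0).map (· + 1)))
        else row) row).length = row.length := by
  intro bag
  induction bag with
  | nil => intro row; rfl
  | cons s rest ih =>
    intro row
    rw [List.foldl_cons]
    by_cases hc : (j0 + s.toList.length ≤ n ∧ (cs.drop j0).take s.toList.length = s.toList)
    · rw [if_pos hc, ih, List.length_set]
    · rw [if_neg hc, ih]

-- one iteration of A's j-loop, expressed on the single row it modifies
def rBody (cs : List Char) (n : Nat) (prev : Nat → Option Int) (bag : List String)
    (row : List (Option Int)) (j : Nat) : List (Option Int) :=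
  bag.foldl (fun row s =>
    if j + s.toList.length ≤ n ∧ (cs.drop j).take s.toList.length = s.toList then
      row.set (j + s.toList.length)
        (omin (row.getD (j + s.toList.length) none) ((prev j).map (· + 1)))
    else row) (row.set j (omin (row.getD j none) (prev j)))

lemma rBody_len (cs : List Char) (n : Nat) (prev : Nat → Option Int) (bag : List String)
    (row : List (Option Int)) (j : Nat) : (rBody cs n prev bag row j).length = row.length := by
  unfold rBody
  rw [scat_len, List.length_set]

lemma rstep_char (cs : List Char) (n : Nat) (prev : Nat → Option Int) (bag : List String)
    (j0 : Nat) (hj0 : j0 ≤ n) (row : List (Option Int)) (hrow : row.length = n + 1)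
    (hinv : ∀ k ≤ n, row.getD k none
      = omin (if k < j0 then prev k else none) (gath cs prev bag j0 k)) :
    ∀ k ≤ n, (rBody cs n prev bag row j0).getD k none
      = omin (if k < j0 + 1 then prev k else none) (gath cs prev bag (j0 + 1) k) := by
  intro k hk
  have hrow1 : (row.set j0 (omin (row.getD j0 none) (prev j0))).length = n + 1 := by
    rw [List.length_set]; exact hrow
  unfold rBody
  rw [scat cs n prev j0 bag _ hrow1 k hk]
  have hsplit : gath cs prev bag (j0 + 1) k
      = omin (gath cs prev bag j0 k)
             (ominFold bag (condA cs j0 k) (fun _ => (prev j0).map (· + 1)) none) := by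
    unfold gath
    rw [ominFold_split bag (condG cs j0 k)
      (fun s => decide (s.toList.length ≤ k) && decide (k - s.toList.length = j0)
        && matchB cs (k - s.toList.length) s)
      (condG cs (j0 + 1) k) (gVal prev k)
      (fun s _ => by
        constructor
        · apply bool_eq_of_iff
          simp only [condG, Bool.and_eq_true, Bool.or_eq_true, decide_eq_true_eq]
          constructor
          · rintro ⟨⟨h1, h2⟩, h3⟩
            by_cases h4 : k - s.toList.length < j0
            · exact Or.inl ⟨⟨h1, h4⟩, h3⟩
            · exact Or.inr ⟨⟨h1, by omega⟩, h3⟩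
          · rintro (⟨⟨h1, h2⟩, h3⟩ | ⟨⟨h1, h2⟩, h3⟩) <;> exact ⟨⟨h1, by omega⟩, h3⟩
        · rintro ⟨hg, hq⟩
          simp only [condG, Bool.and_eq_true, decide_eq_true_eq] at hg hq
          omega)]
    congr 1
    refine ominFold_congr bag _ _ _ _ none (fun s _ => ?_)
    constructor
    · apply bool_eq_of_iff
      simp only [condA, matchB, Bool.and_eq_true, decide_eq_true_eq]
      constructor
      · rintro ⟨⟨h1, h2⟩, h3⟩
        rw [h2] at h3
        exact ⟨by omega, h3⟩
      · rintro ⟨h1, h3⟩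
        have h2 : k - s.toList.length = j0 := by omega
        rw [h2]
        exact ⟨⟨by omega, rfl⟩, h3⟩
    · intro hq
      simp only [Bool.and_eq_true, decide_eq_true_eq] at hq
      unfold gVal
      rw [hq.1.2]
  rw [hsplit]
  by_cases hkj : k = j0
  · rw [hkj]
    rw [getD_set_self row (by omega)]
    rw [hinv j0 (by omega)]
    rw [if_neg (lt_irrefl j0), if_pos (Nat.lt_succ_self j0)]
    have hnone : omin none (gath cs prev bag j0 j0) = gath cs prev bag j0 j0 := rfl
    rw [hnone, omin_comm (gath cs prev bag j0 j0) (prev j0), omin_assoc]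
  · rw [getD_set_ne row (fun h => hkj h.symm)]
    rw [hinv k hk]
    have hif : (if k < j0 + 1 then prev k else none) = (if k < j0 then prev k else none) := by
      by_cases h1 : k < j0
      · rw [if_pos h1, if_pos (by omega)]
      · rw [if_neg h1, if_neg (by omega)]
    rw [hif, omin_assoc]

lemma rloop (cs : List Char) (n : Nat) (prev : Nat → Option Int) (bag : List String) :
    ∀ m, m ≤ n + 1 →
    (∀ k ≤ n, ((List.range m).foldl (rBody cs n prev bag)
        (List.replicate (n + 1) (none : Option Int))).getD k none
      = omin (if k < m then prev k else none) (gath cs prev bag m k))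
    ∧ ((List.range m).foldl (rBody cs n prev bag)
        (List.replicate (n + 1) (none : Option Int))).length = n + 1 := by
  intro m
  induction m with
  | zero =>
    intro _
    constructor
    · intro k hk
      have hg : gath cs prev bag 0 k = none := by
        apply ominFold_false
        intro s _
        simp [condG]
      rw [hg]
      rw [List.range_zero, List.foldl_nil, List.getD_replicate _ (by omega : k < n + 1),
        if_neg (Nat.not_lt_zero k)]
      rfl
    · simp
  | succ m ih =>
    intro hm
    obtain ⟨ih1, ih2⟩ := ih (by omega)
    rw [List.range_succ, List.foldl_append, List.foldl_cons, List.foldl_nil]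
    constructor
    · exact rstep_char cs n prev bag m (by omega) _ ih2 ih1
    · rw [rBody_len]; exact ih2

lemma row_final (cs : List Char) (n : Nat) (prev : Nat → Option Int) (bag : List String) :
    ∀ k ≤ n, ((List.range (n + 1)).foldl (rBody cs n prev bag)
        (List.replicate (n + 1) (none : Option Int))).getD k none = relax cs prev bag k := by
  intro k hk
  rw [(rloop cs n prev bag (n + 1) le_rfl).1 k hk, if_pos (by omega)]
  have hg : gath cs prev bag (n + 1) k = ominFold bag (condR cs k) (gVal prev k) none := by
    unfold gath
    refine ominFold_congr bag _ _ _ _ none (fun s _ => ⟨?_, fun _ => rfl⟩)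
    apply bool_eq_of_iff
    simp only [condG, condR, Bool.and_eq_true, decide_eq_true_eq]
    constructor
    · rintro ⟨⟨h1, _⟩, h3⟩; exact ⟨h1, h3⟩
    · rintro ⟨h1, h3⟩; exact ⟨⟨h1, by omega⟩, h3⟩
  rw [hg]
  exact (ominFold_pull bag (condR cs k) (gVal prev k) (prev k)).symm

-- ----- lifting A's table operations to the single modified row -----
lemma lift_fold (cs : List Char) (n i j : Nat) (bag : List String)
    (dp : List (List (Option Int))) (hi : 1 ≤ i) (hlen : i < dp.length) :
    ∀ r, bag.foldl (fun dp' s =>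
        if j + s.toList.length ≤ n ∧ (cs.drop j).take s.toList.length = s.toList then
          set2 dp' i (j + s.toList.length)
            (omin (get2 dp' i (j + s.toList.length)) ((get2 dp' (i - 1) j).map (· + 1)))
        else dp') (dp.set i r)
      = dp.set i (bag.foldl (fun row s =>
          if j + s.toList.length ≤ n ∧ (cs.drop j).take s.toList.length = s.toList then
            row.set (j + s.toList.length)
              (omin (row.getD (j + s.toList.length) none) ((get2 dp (i - 1) j).map (· + 1)))
          else row) r) := by
  induction bag with
  | nil => intro r; rfl
  | cons s rest ih =>
    intro r
    rw [List.foldl_cons, List.foldl_cons]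
    by_cases hc : (j + s.toList.length ≤ n ∧ (cs.drop j).take s.toList.length = s.toList)
    · rw [if_pos hc, if_pos hc]
      have h1 : get2 (dp.set i r) i (j + s.toList.length) = r.getD (j + s.toList.length) none := by
        unfold get2
        rw [getD_set_self dp hlen]
      have h2 : get2 (dp.set i r) (i - 1) j = get2 dp (i - 1) j := by
        unfold get2
        rw [getD_set_ne dp (by omega)]
      have h3 : set2 (dp.set i r) i (j + s.toList.length)
            (omin (r.getD (j + s.toList.length) none) ((get2 dp (i - 1) j).map (· + 1)))
          = dp.set i (r.set (j + s.toList.length)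
            (omin (r.getD (j + s.toList.length) none) ((get2 dp (i - 1) j).map (· + 1)))) := by
        unfold set2
        rw [getD_set_self dp hlen, List.set_set]
      rw [h1, h2, h3]
      exact ih _
    · rw [if_neg hc, if_neg hc]
      exact ih r

lemma lift_body (cs : List Char) (n i j : Nat) (bag : List String)
    (dp : List (List (Option Int))) (hi : 1 ≤ i) (hlen : i < dp.length) :
    aBody cs n i bag dp j
      = dp.set i (rBody cs n (fun k => get2 dp (i - 1) k) bag (dp.getD i []) j) := by
  show bag.foldl _ (set2 dp i j (omin (get2 dp i j) (get2 dp (i - 1) j))) = _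
  have hstart : set2 dp i j (omin (get2 dp i j) (get2 dp (i - 1) j))
      = dp.set i ((dp.getD i []).set j (omin ((dp.getD i []).getD j none) (get2 dp (i - 1) j))) := rfl
  rw [hstart]
  exact lift_fold cs n i j bag dp hi hlen _

lemma lift_loop (cs : List Char) (n i : Nat) (bag : List String)
    (dp : List (List (Option Int))) (hi : 1 ≤ i) (hlen : i < dp.length) :
    ∀ (js : List Nat) (r : List (Option Int)),
    js.foldl (aBody cs n i bag) (dp.set i r)
      = dp.set i (js.foldl (rBody cs n (fun k => get2 dp (i - 1) k) bag) r) := by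
  intro js
  induction js with
  | nil => intro r; rfl
  | cons j js ih =>
    intro r
    rw [List.foldl_cons, List.foldl_cons]
    have hlen' : i < (dp.set i r).length := by rw [List.length_set]; exact hlen
    rw [lift_body cs n i j bag (dp.set i r) hi hlen']
    have hprev : (fun k => get2 (dp.set i r) (i - 1) k) = (fun k => get2 dp (i - 1) k) := by
      funext k
      unfold get2
      rw [getD_set_ne dp (by omega)]
    have hrow : (dp.set i r).getD i [] = r := getD_set_self dp hlen r []
    rw [hprev, hrow, List.set_set]
    exact ih _

lemma layer_eq (cs : List Char) (n i : Nat) (bag : List String)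
    (dp : List (List (Option Int))) (hi : 1 ≤ i) (hlen : i < dp.length) :
    (List.range (n + 1)).foldl (aBody cs n i bag) dp
      = dp.set i ((List.range (n + 1)).foldl (rBody cs n (fun k => get2 dp (i - 1) k) bag)
          (dp.getD i [])) := by
  have h0 : dp = dp.set i (dp.getD i []) := (set_getD_self dp hlen []).symm
  conv_lhs => rw [h0]
  exact lift_loop cs n i bag dp hi hlen _ _

-- ----- A's outer loop -----
def aIter (cs : List Char) (n : Nat) (bags : List (List String)) (m : Nat) :
    List (List (Option Int)) :=
  (List.range m).foldl
    (fun dp mm => (List.range (n + 1)).foldl (aBody cs n (mm + 1) (bags.getD mm [])) dp)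
    (set2 (List.replicate (bags.length + 1) (List.replicate (n + 1) (none : Option Int))) 0 0 (some 0))

lemma aIter_succ (cs : List Char) (n : Nat) (bags : List (List String)) (m : Nat) :
    aIter cs n bags (m + 1)
      = (List.range (n + 1)).foldl (aBody cs n (m + 1) (bags.getD m [])) (aIter cs n bags m) := by
  unfold aIter
  rw [show List.range (m + 1) = List.range m ++ [m] from List.range_succ,
    List.foldl_append, List.foldl_cons, List.foldl_nil]

lemma aInv (cs : List Char) (n : Nat) (bags : List (List String)) :
    ∀ m, m ≤ bags.length →
    (aIter cs n bags m).length = bags.length + 1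
    ∧ (∀ r, m < r → r ≤ bags.length → (aIter cs n bags m).getD r []
        = List.replicate (n + 1) (none : Option Int))
    ∧ (∀ k ≤ n, get2 (aIter cs n bags m) m k
        = (bags.take m).foldl (fun f bag k => relax cs f bag k) initF k) := by
  intro m
  induction m with
  | zero =>
    intro _
    have hrow0 : (aIter cs n bags 0).getD 0 []
        = (List.replicate (n + 1) (none : Option Int)).set 0 (some 0) := by
      show (set2 _ 0 0 (some 0)).getD 0 [] = _
      unfold set2
      rw [getD_set_self _ (by rw [List.length_replicate]; omega),
        List.getD_replicate _ (by omega : 0 < bags.length + 1)]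
    refine ⟨?_, ?_, ?_⟩
    · show (set2 _ 0 0 (some 0)).length = _
      unfold set2
      rw [List.length_set, List.length_replicate]
    · intro r hr _
      show (set2 _ 0 0 (some 0)).getD r [] = _
      unfold set2
      rw [getD_set_ne _ (by omega), List.getD_replicate _ (by omega : r < bags.length + 1)]
    · intro k hk
      unfold get2
      rw [hrow0, List.take_zero, List.foldl_nil]
      by_cases hk0 : k = 0
      · rw [hk0, getD_set_self _ (by rw [List.length_replicate]; omega)]
        rfl
      · rw [getD_set_ne _ (fun h => hk0 h.symm), List.getD_replicate _ (by omega : k < n + 1)]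
        unfold initF
        rw [if_neg hk0]
  | succ m ih =>
    intro hm
    obtain ⟨ih1, ih2, ih3⟩ := ih (by omega)
    have hlen : m + 1 < (aIter cs n bags m).length := by rw [ih1]; omega
    have hrowm : (aIter cs n bags m).getD (m + 1) []
        = List.replicate (n + 1) (none : Option Int) :=
      ih2 (m + 1) (by omega) (by omega)
    have hlayer := layer_eq cs n (m + 1) (bags.getD m []) (aIter cs n bags m) (by omega) hlen
    rw [aIter_succ, hlayer, hrowm]
    refine ⟨?_, ?_, ?_⟩
    · rw [List.length_set]; exact ih1
    · intro r hr hrB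
      rw [getD_set_ne _ (by omega)]
      exact ih2 r (by omega) hrB
    · intro k hk
      unfold get2
      rw [getD_set_self _ hlen]
      rw [row_final cs n _ (bags.getD m []) k hk]
      have hcongr : relax cs (fun k => ((aIter cs n bags m).getD (m + 1 - 1) []).getD k none) (bags.getD m []) k
          = relax cs ((bags.take m).foldl (fun f bag k => relax cs f bag k) initF) (bags.getD m []) k :=
        relax_congr cs _ _ _ k (fun j hj => ih3 j (by omega))
      rw [hcongr]
      have htake : bags.take (m + 1) = bags.take m ++ [bags.getD m []] := by
        rw [List.take_add_one, List.getElem?_eq_getElem (by omega : m < bags.length)]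
        simp [List.getD_eq_getElem?_getD, List.getElem?_eq_getElem (by omega : m < bags.length)]
      rw [htake, List.foldl_append, List.foldl_cons, List.foldl_nil]

-- ===== the semantic bridge: DP layers as a cost-level reachability predicate =====

def Dfam (cs : List Char) (bags : List (List String)) : Nat → Nat → Option Int
  | 0 => initF
  | i + 1 => fun k => relax cs (Dfam cs bags i) (bags.getD i []) k

def rleB (cs : List Char) (bags : List (List String)) (i j c : Nat) : Bool :=
  match Dfam cs bags i j with
  | none => false
  | some v => decide (v ≤ (c : Int))

def rho (cs : List Char) (bags : List (List String)) (c j : Nat) : Option Nat :=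
  if h : rleB cs bags bags.length j c = true then
    some (Nat.find (⟨bags.length, h⟩ : ∃ i, rleB cs bags i j c = true))
  else none

-- ----- Dfam basics -----
lemma relax_nil (cs : List Char) (f : Nat → Option Int) (k : Nat) : relax cs f [] k = f k := rfl

lemma Dfam_eq_take (cs : List Char) (bags : List (List String)) :
    ∀ m k, Dfam cs bags m k = (bags.take m).foldl (fun f bag k => relax cs f bag k) initF k := by
  intro m
  induction m with
  | zero => intro k; rfl
  | succ m ih =>
    intro k
    show relax cs (Dfam cs bags m) (bags.getD m []) k = _
    rw [relax_congr cs _ _ _ k (fun j _ => ih j)]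
    by_cases hm : m < bags.length
    · have htake : bags.take (m + 1) = bags.take m ++ [bags.getD m []] := by
        rw [List.take_add_one, List.getElem?_eq_getElem hm]
        simp [List.getD_eq_getElem?_getD, List.getElem?_eq_getElem hm]
      rw [htake, List.foldl_append, List.foldl_cons, List.foldl_nil]
    · have h1 : bags.take (m + 1) = bags.take m := by
        rw [List.take_of_length_le (by omega), List.take_of_length_le (by omega)]
      have h2 : bags.getD m [] = [] := by
        rw [List.getD_eq_getElem?_getD, List.getElem?_eq_none (by omega)]
        rfl
      rw [h1, h2, relax_nil]

lemma Dfam_stab (cs : List Char) (bags : List (List String)) {i : Nat} (h : bags.length ≤ i) :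
    ∀ k, Dfam cs bags i k = Dfam cs bags bags.length k := by
  intro k
  rw [Dfam_eq_take, Dfam_eq_take, List.take_of_length_le h, List.take_of_length_le le_rfl]

lemma rleB_iff (cs : List Char) (bags : List (List String)) (i j c : Nat) :
    rleB cs bags i j c = true ↔ ∃ v, Dfam cs bags i j = some v ∧ v ≤ (c : Int) := by
  unfold rleB
  cases h : Dfam cs bags i j <;> simp

-- ----- ominFold characterisations -----
lemma omin_some_le_iff (a b : Option Int) (c : Int) :
    (∃ v, omin a b = some v ∧ v ≤ c) ↔ (∃ v, a = some v ∧ v ≤ c) ∨ (∃ v, b = some v ∧ v ≤ c) := by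
  cases a <;> cases b <;> simp [omin]

lemma ominFold_some_le_iff (bag : List String) (p : String → Bool) (g : String → Option Int)
    (c : Int) : ∀ a,
    (∃ v, ominFold bag p g a = some v ∧ v ≤ c) ↔
      (∃ v, a = some v ∧ v ≤ c) ∨ ∃ s ∈ bag, p s = true ∧ ∃ v, g s = some v ∧ v ≤ c := by
  induction bag with
  | nil => intro a; simp [ominFold]
  | cons s rest ih =>
    intro a
    rw [ominFold_cons]
    by_cases hp : p s = true
    · rw [if_pos hp, ih, omin_some_le_iff]
      constructor
      · rintro ((h | h) | ⟨s', hs', hps', h⟩)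
        · exact Or.inl h
        · exact Or.inr ⟨s, by simp, hp, h⟩
        · exact Or.inr ⟨s', by simp [hs'], hps', h⟩
      · rintro (h | ⟨s', hs', hps', h⟩)
        · exact Or.inl (Or.inl h)
        · rcases List.mem_cons.mp hs' with rfl | hs'
          · exact Or.inl (Or.inr h)
          · exact Or.inr ⟨s', hs', hps', h⟩
    · rw [if_neg hp, ih]
      constructor
      · rintro (h | ⟨s', hs', hps', h⟩)
        · exact Or.inl h
        · exact Or.inr ⟨s', by simp [hs'], hps', h⟩
      · rintro (h | ⟨s', hs', hps', h⟩)
        · exact Or.inl h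
        · rcases List.mem_cons.mp hs' with rfl | hs'
          · exact absurd hps' hp
          · exact Or.inr ⟨s', hs', hps', h⟩

lemma gVal_some_le_iff (f : Nat → Option Int) (k : Nat) (s : String) (c : Int) :
    (∃ v, gVal f k s = some v ∧ v ≤ c) ↔ ∃ v, f (k - s.toList.length) = some v ∧ v + 1 ≤ c := by
  unfold gVal
  cases h : f (k - s.toList.length) <;> simp

lemma relax_some_le_iff (cs : List Char) (f : Nat → Option Int) (bag : List String) (k : Nat)
    (c : Int) :
    (∃ v, relax cs f bag k = some v ∧ v ≤ c) ↔
      (∃ v, f k = some v ∧ v ≤ c) ∨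
        ∃ s ∈ bag, condR cs k s = true ∧ ∃ v, f (k - s.toList.length) = some v ∧ v + 1 ≤ c := by
  unfold relax
  rw [ominFold_some_le_iff]
  refine or_congr Iff.rfl ?_
  refine exists_congr fun s => and_congr Iff.rfl (and_congr Iff.rfl ?_)
  exact gVal_some_le_iff f k s c

lemma ominFold_some_prop (Q : Int → Prop) (hmin : ∀ a b, Q a → Q b → Q (min a b))
    (bag : List String) (p : String → Bool) (g : String → Option Int)
    (hg : ∀ s ∈ bag, p s = true → ∀ v, g s = some v → Q v) :
    ∀ a, (∀ v, a = some v → Q v) → ∀ v, ominFold bag p g a = some v → Q v := by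
  induction bag with
  | nil => intro a ha v hv; exact ha v hv
  | cons s rest ih =>
    intro a ha v hv
    rw [ominFold_cons] at hv
    refine ih (fun x hx hpx => hg x (by simp [hx]) hpx) _ ?_ v hv
    intro w hw
    by_cases hp : p s = true
    · rw [if_pos hp] at hw
      have hQg : ∀ v, g s = some v → Q v := hg s (by simp) hp
      rcases hA : a with _ | av <;> rcases hG : g s with _ | gv <;>
        rw [hA, hG] at hw <;> simp only [omin] at hw
      · cases hw
      · cases hw; exact hQg _ hG
      · cases hw; exact ha _ hA
      · cases hw; exact hmin _ _ (ha _ hA) (hQg _ hG)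
    · rw [if_neg hp] at hw
      exact ha w hw

lemma Dfam_bound (cs : List Char) (bags : List (List String)) :
    ∀ i j v, Dfam cs bags i j = some v → 0 ≤ v ∧ v ≤ (i : Int) := by
  intro i
  induction i with
  | zero =>
    intro j v h
    unfold Dfam initF at h
    by_cases hj : j = 0
    · rw [if_pos hj] at h
      cases h; constructor <;> omega
    · rw [if_neg hj] at h
      cases h
  | succ i ih =>
    intro j v h
    have := ominFold_some_prop (fun v => 0 ≤ v ∧ v ≤ (i : Int) + 1) (by intro a b ha hb; omega)
      (bags.getD i []) (condR cs j) (gVal (Dfam cs bags i) j)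
      (by
        intro s _ _ w hw
        unfold gVal at hw
        cases hf : Dfam cs bags i (j - s.toList.length) with
        | none => rw [hf] at hw; simp at hw
        | some u =>
          rw [hf] at hw
          simp at hw
          have := ih _ u hf
          omega)
      (Dfam cs bags i j)
      (by intro w hw; have := ih j w hw; omega)
      v h
    push_cast
    push_cast at this
    exact this

lemma matchB_len (cs : List Char) (j : Nat) (s : String) (h : matchB cs j s = true) :
    s.toList.length ≤ cs.length - j := by
  have h' : (cs.drop j).take s.toList.length = s.toList := by simpa [matchB] using h
  have := congrArg List.length h'
  simp only [List.length_take, List.length_drop] at this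
  omega

lemma Dfam_le_n (cs : List Char) (bags : List (List String)) :
    ∀ i j v, Dfam cs bags i j = some v → j ≤ cs.length := by
  intro i
  induction i with
  | zero =>
    intro j v h
    unfold Dfam initF at h
    by_cases hj : j = 0
    · omega
    · rw [if_neg hj] at h
      cases h
  | succ i ih =>
    intro j v h
    have hle : ∃ w, Dfam cs bags (i+1) j = some w ∧ w ≤ v := ⟨v, h, le_rfl⟩
    have : (∃ w, relax cs (Dfam cs bags i) (bags.getD i []) j = some w ∧ w ≤ v) := hle
    rw [relax_some_le_iff] at this
    rcases this with ⟨w, hw, _⟩ | ⟨s, _, hcond, w, hw, _⟩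
    · exact ih j w hw
    · have hj0 := ih _ w hw
      simp only [condR, Bool.and_eq_true, decide_eq_true_eq] at hcond
      have := matchB_len cs (j - s.toList.length) s hcond.2
      omega

-- ----- rleB monotonicity and rho -----
lemma rleB_succ (cs : List Char) (bags : List (List String)) (i j c : Nat)
    (h : rleB cs bags i j c = true) : rleB cs bags (i + 1) j c = true := by
  rw [rleB_iff] at h ⊢
  show ∃ v, relax cs (Dfam cs bags i) (bags.getD i []) j = some v ∧ v ≤ (c : Int)
  rw [relax_some_le_iff]
  exact Or.inl h

lemma rleB_mono_i (cs : List Char) (bags : List (List String)) {i i' : Nat} (hii : i ≤ i')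
    (j c : Nat) (h : rleB cs bags i j c = true) : rleB cs bags i' j c = true := by
  obtain ⟨d, rfl⟩ := Nat.exists_eq_add_of_le hii
  clear hii
  induction d with
  | zero => exact h
  | succ d ih => exact rleB_succ cs bags (i + d) j c ih

lemma rleB_mono_c (cs : List Char) (bags : List (List String)) (i j : Nat) {c c' : Nat}
    (hcc : c ≤ c') (h : rleB cs bags i j c = true) : rleB cs bags i j c' = true := by
  rw [rleB_iff] at h ⊢
  rcases h with ⟨v, hv, hvc⟩
  exact ⟨v, hv, le_trans hvc (by exact_mod_cast hcc)⟩

lemma rleB_to_len (cs : List Char) (bags : List (List String)) (i j c : Nat)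
    (h : rleB cs bags i j c = true) : rleB cs bags bags.length j c = true := by
  by_cases hle : i ≤ bags.length
  · exact rleB_mono_i cs bags hle j c h
  · rw [rleB_iff] at h ⊢
    rcases h with ⟨v, hv, hvc⟩
    rw [Dfam_stab cs bags (by omega) j] at hv
    exact ⟨v, hv, hvc⟩

lemma rho_some_iff (cs : List Char) (bags : List (List String)) (c j m : Nat) :
    rho cs bags c j = some m ↔
      (rleB cs bags m j c = true ∧ ∀ i < m, rleB cs bags i j c = false) := by
  unfold rho
  split_ifs with h
  · simp only [Option.some_inj]
    rw [Nat.find_eq_iff]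
    constructor
    · rintro ⟨h1, h2⟩
      exact ⟨h1, fun i hi => by
        have := h2 i hi
        cases hb : rleB cs bags i j c
        · rfl
        · exact absurd hb this⟩
    · rintro ⟨h1, h2⟩
      exact ⟨h1, fun i hi => by rw [h2 i hi]; simp⟩
  · constructor
    · intro hc; cases hc
    · rintro ⟨h1, _⟩
      exact absurd (rleB_to_len cs bags m j c h1) h
lemma rho_none_iff (cs : List Char) (bags : List (List String)) (c j : Nat) :
    rho cs bags c j = none ↔ ∀ i, rleB cs bags i j c = false := by
  unfold rho
  split_ifs with h
  · constructor
    · intro hc; cases hc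
    · intro hall; rw [hall bags.length] at h; cases h
  · constructor
    · intro _ i
      cases hb : rleB cs bags i j c
      · rfl
      · exact absurd (rleB_to_len cs bags i j c hb) h
    · intro _; rfl

lemma rleB_zero (cs : List Char) (bags : List (List String)) :
    ∀ i j, rleB cs bags i j 0 = true → j = 0 := by
  intro i
  induction i with
  | zero =>
    intro j h
    rw [rleB_iff] at h
    rcases h with ⟨v, hv, _⟩
    unfold Dfam initF at hv
    by_cases hj : j = 0
    · exact hj
    · rw [if_neg hj] at hv
      cases hv
  | succ i ih =>
    intro j h
    rw [rleB_iff] at h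
    have : ∃ v, relax cs (Dfam cs bags i) (bags.getD i []) j = some v ∧ v ≤ (0:Int) := h
    rw [relax_some_le_iff] at this
    rcases this with ⟨v, hv, hvc⟩ | ⟨s, _, _, v, hv, hvc⟩
    · exact ih j ((rleB_iff cs bags i j 0).mpr ⟨v, hv, hvc⟩)
    · have := Dfam_bound cs bags i _ v hv
      omega
-- ----- scalar min-fold over candidate bag indices -----
def omn (o : Option Nat) (v : Nat) : Option Nat :=
  some (match o with | none => v | some w => min w v)

def mfold (L : List Nat) (o : Option Nat) : Option Nat :=
  L.foldl (fun o b => omn o (b + 1)) o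

lemma mfold_nil (o : Option Nat) : mfold [] o = o := rfl

lemma mfold_cons (b : Nat) (L : List Nat) (o : Option Nat) :
    mfold (b :: L) o = mfold L (omn o (b + 1)) := rfl

lemma mfold_append (L1 L2 : List Nat) (o : Option Nat) :
    mfold (L1 ++ L2) o = mfold L2 (mfold L1 o) := List.foldl_append

lemma omn_idem (o : Option Nat) (v : Nat) : omn (omn o v) v = omn o v := by
  cases o <;> simp [omn]

lemma mfold_some_iff (L : List Nat) : ∀ (o : Option Nat) (m : Nat),
    mfold L o = some m ↔
      ((o = some m ∨ ∃ b ∈ L, b + 1 = m) ∧ (∀ w, o = some w → m ≤ w) ∧ (∀ b ∈ L, m ≤ b + 1)) := by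
  induction L with
  | nil =>
    intro o m
    rw [mfold_nil]
    constructor
    · intro h
      exact ⟨Or.inl h, fun w hw => by rw [h] at hw; cases hw; exact le_rfl, by simp⟩
    · rintro ⟨h1 | h1, h2, h3⟩
      · exact h1
      · simp at h1
  | cons b L ih =>
    intro o m
    rw [mfold_cons, ih]
    rcases o with _ | w
    · simp only [omn]
      constructor
      · rintro ⟨h1, h2, h3⟩
        have hm : m ≤ b + 1 := h2 (b + 1) rfl
        refine ⟨Or.inr ?_, ?_, ?_⟩
        · rcases h1 with h1 | ⟨b', hb', hb1⟩
          · exact ⟨b, by simp, by cases h1; rfl⟩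
          · exact ⟨b', List.mem_cons_of_mem _ hb', hb1⟩
        · rintro w hw
          cases hw
        · intro b' hb'
          rcases List.mem_cons.mp hb' with rfl | hmem
          · exact hm
          · exact h3 b' hmem
      · rintro ⟨h1, h2, h3⟩
        have hm : m ≤ b + 1 := h3 b (by simp)
        rcases h1 with h1 | ⟨b', hb', hb1⟩
        · cases h1
        · rcases List.mem_cons.mp hb' with rfl | hmem
          · refine ⟨Or.inl (by rw [hb1]), ?_, fun x hx => h3 x (List.mem_cons_of_mem _ hx)⟩
            rintro w hw
            cases hw
            omega
          · refine ⟨Or.inr ⟨b', hmem, hb1⟩, ?_, fun x hx => h3 x (List.mem_cons_of_mem _ hx)⟩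
            rintro w hw
            cases hw
            exact hm
    · simp only [omn]
      constructor
      · rintro ⟨h1, h2, h3⟩
        have hmw : m ≤ min w (b + 1) := h2 _ rfl
        refine ⟨?_, ?_, ?_⟩
        · rcases h1 with h1 | ⟨b', hb', hb1⟩
          · have hmin : min w (b + 1) = m := by cases h1; rfl
            rcases Nat.le_total w (b + 1) with hc | hc
            · left
              congr 1
              omega
            · right
              exact ⟨b, by simp, by omega⟩
          · right
            exact ⟨b', List.mem_cons_of_mem _ hb', hb1⟩
        · rintro w' hw'
          cases hw'
          omega
        · intro b' hb'
          rcases List.mem_cons.mp hb' with rfl | hmem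
          · omega
          · exact h3 b' hmem
      · rintro ⟨h1, h2, h3⟩
        have hmw : m ≤ w := h2 w rfl
        have hmb : m ≤ b + 1 := h3 b (by simp)
        refine ⟨?_, ?_, fun x hx => h3 x (List.mem_cons_of_mem _ hx)⟩
        · rcases h1 with h1 | ⟨b', hb', hb1⟩
          · left
            cases h1
            congr 1
            omega
          · rcases List.mem_cons.mp hb' with rfl | hmem
            · left
              congr 1
              omega
            · right
              exact ⟨b', hmem, hb1⟩
        · rintro w' hw'
          cases hw'
          omega

-- ----- the min-update of B's inner loop, per key -----
lemma upd_get? (nr : PySem.Dict Nat Nat) (k v x : Nat) :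
    PySem.Dict.get? (match PySem.Dict.get? nr k with
      | none => nr.insert k v
      | some w => if v < w then nr.insert k v else nr) x
    = if x = k then omn (PySem.Dict.get? nr k) v else PySem.Dict.get? nr x := by
  cases h : PySem.Dict.get? nr k with
  | none =>
    dsimp only
    rw [PySem.Dict.get?_insert]
    by_cases hx : x = k
    · subst hx; simp [omn]
    · simp [hx]
  | some w =>
    dsimp only
    by_cases hv : v < w
    · rw [if_pos hv, PySem.Dict.get?_insert]
      by_cases hx : x = k
      · subst hx
        simp only [omn]
        rw [min_eq_right (Nat.le_of_lt hv)]
      · simp [hx]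
    · rw [if_neg hv]
      by_cases hx : x = k
      · subst hx
        simp [h, omn, Nat.min_eq_left (Nat.le_of_not_lt hv)]
      · simp [hx]

lemma upd_nodup (nr : PySem.Dict Nat Nat) (k v : Nat) (h : nr.keys.Nodup) :
    (match PySem.Dict.get? nr k with
      | none => nr.insert k v
      | some w => if v < w then nr.insert k v else nr).keys.Nodup := by
  cases PySem.Dict.get? nr k with
  | none => exact PySem.Dict.nodup_keys_insert nr k v h
  | some w =>
    dsimp only
    by_cases hv : v < w
    · rw [if_pos hv]; exact PySem.Dict.nodup_keys_insert nr k v h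
    · rw [if_neg hv]; exact h

-- ----- characterising the three nested loops of bStep -----
def hitB (cs : List Char) (n j : Nat) (bag : List String) (x : Nat) : Bool :=
  bag.any (fun s => decide (j + s.toList.length ≤ n) &&
    decide ((cs.drop j).take s.toList.length = s.toList) && decide (j + s.toList.length = x))

lemma bInner_get? (cs : List Char) (n j b : Nat) (bag : List String) (x : Nat) :
    ∀ nr, PySem.Dict.get? (bInner cs n j b bag nr) x
      = if hitB cs n j bag x = true then omn (PySem.Dict.get? nr x) (b + 1)
        else PySem.Dict.get? nr x := by
  induction bag with
  | nil => intro nr; simp [bInner, hitB]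
  | cons s rest ih =>
    intro nr
    have hstep : bInner cs n j b (s :: rest) nr
        = bInner cs n j b rest
            (if j + s.toList.length ≤ n ∧ (cs.drop j).take s.toList.length = s.toList then
              match PySem.Dict.get? nr (j + s.toList.length) with
              | none => nr.insert (j + s.toList.length) (b + 1)
              | some w => if b + 1 < w then nr.insert (j + s.toList.length) (b + 1) else nr
            else nr) := rfl
    have hhit : hitB cs n j (s :: rest) x
        = ((decide (j + s.toList.length ≤ n) &&
            decide ((cs.drop j).take s.toList.length = s.toList) &&
            decide (j + s.toList.length = x)) || hitB cs n j rest x) := by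
      simp [hitB]
    rw [hstep, ih]
    by_cases hc : j + s.toList.length ≤ n ∧ (cs.drop j).take s.toList.length = s.toList
    · rw [if_pos hc]
      by_cases hx : j + s.toList.length = x
      · have hs : (decide (j + s.toList.length ≤ n) &&
            decide ((cs.drop j).take s.toList.length = s.toList) &&
            decide (j + s.toList.length = x)) = true := by
          rw [Bool.and_eq_true, Bool.and_eq_true]
          exact ⟨⟨decide_eq_true hc.1, decide_eq_true hc.2⟩, decide_eq_true hx⟩
        rw [hhit, hs]
        simp only [Bool.true_or, if_true]
        rw [upd_get?, hx, if_pos rfl]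
        by_cases hr : hitB cs n j rest x = true
        · rw [if_pos hr, omn_idem]
        · rw [if_neg hr]
      · have hs : (decide (j + s.toList.length ≤ n) &&
            decide ((cs.drop j).take s.toList.length = s.toList) &&
            decide (j + s.toList.length = x)) = false := by
          rw [Bool.and_eq_false_iff]
          exact Or.inr (decide_eq_false hx)
        rw [hhit, hs]
        simp only [Bool.false_or]
        rw [upd_get?]
        rw [if_neg (show ¬ x = j + s.toList.length from fun heq => hx heq.symm)]
    · rw [if_neg hc]
      have hs : (decide (j + s.toList.length ≤ n) &&
          decide ((cs.drop j).take s.toList.length = s.toList) &&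
          decide (j + s.toList.length = x)) = false := by
        rw [Bool.and_eq_false_iff]
        left
        rw [Bool.and_eq_false_iff]
        rcases not_and_or.mp hc with h | h
        · exact Or.inl (decide_eq_false h)
        · exact Or.inr (decide_eq_false h)
      rw [hhit, hs]
      simp only [Bool.false_or]

lemma bInner_nodup (cs : List Char) (n j b : Nat) (bag : List String) :
    ∀ nr : PySem.Dict Nat Nat, nr.keys.Nodup → (bInner cs n j b bag nr).keys.Nodup := by
  induction bag with
  | nil => intro nr h; exact h
  | cons s rest ih =>
    intro nr h
    have hstep : bInner cs n j b (s :: rest) nr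
        = bInner cs n j b rest
            (if j + s.toList.length ≤ n ∧ (cs.drop j).take s.toList.length = s.toList then
              match PySem.Dict.get? nr (j + s.toList.length) with
              | none => nr.insert (j + s.toList.length) (b + 1)
              | some w => if b + 1 < w then nr.insert (j + s.toList.length) (b + 1) else nr
            else nr) := rfl
    rw [hstep]
    apply ih
    by_cases hc : j + s.toList.length ≤ n ∧ (cs.drop j).take s.toList.length = s.toList
    · rw [if_pos hc]; exact upd_nodup nr _ _ h
    · rw [if_neg hc]; exact h

lemma bfold_get? (cs : List Char) (n : Nat) (bags : List (List String)) (j x : Nat) :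
    ∀ (bs : List Nat) (nr : PySem.Dict Nat Nat),
    PySem.Dict.get? (bs.foldl (fun nr b => bInner cs n j b (bags.getD b []) nr) nr) x
      = mfold (bs.filter (fun b => hitB cs n j (bags.getD b []) x)) (PySem.Dict.get? nr x) := by
  intro bs
  induction bs with
  | nil => intro nr; rfl
  | cons b bs ih =>
    intro nr
    rw [List.foldl_cons, ih, List.filter_cons]
    by_cases hb : hitB cs n j (bags.getD b []) x = true
    · rw [if_pos hb, mfold_cons, bInner_get?, if_pos hb]
    · rw [if_neg hb, bInner_get?, if_neg hb]

lemma bfold_nodup (cs : List Char) (n : Nat) (bags : List (List String)) (j : Nat) :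
    ∀ (bs : List Nat) (nr : PySem.Dict Nat Nat), nr.keys.Nodup →
    ((bs.foldl (fun nr b => bInner cs n j b (bags.getD b []) nr) nr)).keys.Nodup := by
  intro bs
  induction bs with
  | nil => intro nr h; exact h
  | cons b bs ih =>
    intro nr h
    rw [List.foldl_cons]
    exact ih _ (bInner_nodup cs n j b _ nr h)

def candsB (cs : List Char) (n BN : Nat) (bags : List (List String))
    (l : List (Nat × Nat)) (x : Nat) : List Nat :=
  l.flatMap (fun ji =>
    (List.range' ji.2 (BN - ji.2)).filter (fun b => hitB cs n ji.1 (bags.getD b []) x))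

lemma bStep_fold_get? (cs : List Char) (n BN : Nat) (bags : List (List String)) (x : Nat) :
    ∀ (l : List (Nat × Nat)) (nr : PySem.Dict Nat Nat),
    PySem.Dict.get? (l.foldl (fun nr ji =>
        (List.range' ji.2 (BN - ji.2)).foldl (fun nr b => bInner cs n ji.1 b (bags.getD b []) nr) nr) nr) x
      = mfold (candsB cs n BN bags l x) (PySem.Dict.get? nr x) := by
  intro l
  induction l with
  | nil => intro nr; rfl
  | cons ji l ih =>
    intro nr
    rw [List.foldl_cons, ih, bfold_get?]
    have hc : candsB cs n BN bags (ji :: l) x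
        = ((List.range' ji.2 (BN - ji.2)).filter (fun b => hitB cs n ji.1 (bags.getD b []) x))
          ++ candsB cs n BN bags l x := by
      simp [candsB]
    rw [hc, mfold_append]

lemma bStep_get? (cs : List Char) (n BN : Nat) (bags : List (List String))
    (r : PySem.Dict Nat Nat) (x : Nat) :
    PySem.Dict.get? (bStep cs n BN bags r) x
      = mfold (candsB cs n BN bags r.items x) (PySem.Dict.get? r x) :=
  bStep_fold_get? cs n BN bags x r.items r

lemma bStep_fold_nodup (cs : List Char) (n BN : Nat) (bags : List (List String)) :
    ∀ (l : List (Nat × Nat)) (nr : PySem.Dict Nat Nat), nr.keys.Nodup →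
    ((l.foldl (fun nr ji =>
        (List.range' ji.2 (BN - ji.2)).foldl (fun nr b => bInner cs n ji.1 b (bags.getD b []) nr) nr) nr)).keys.Nodup := by
  intro l
  induction l with
  | nil => intro nr h; exact h
  | cons ji l ih =>
    intro nr h
    rw [List.foldl_cons]
    exact ih _ (bfold_nodup cs n bags ji.1 (List.range' ji.2 (BN - ji.2)) nr h)

lemma bStep_nodup (cs : List Char) (n BN : Nat) (bags : List (List String))
    (r : PySem.Dict Nat Nat) (h : r.keys.Nodup) : (bStep cs n BN bags r).keys.Nodup :=
  bStep_fold_nodup cs n BN bags r.items r h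

-- ----- semantic reading of the candidate list -----
lemma hitB_iff (cs : List Char) (n j : Nat) (bag : List String) (x : Nat) :
    hitB cs n j bag x = true ↔
      ∃ s ∈ bag, j + s.toList.length ≤ n ∧ (cs.drop j).take s.toList.length = s.toList ∧
        j + s.toList.length = x := by
  simp only [hitB, List.any_eq_true, Bool.and_eq_true, decide_eq_true_eq]
  constructor
  · rintro ⟨s, hs, ⟨⟨h1, h2⟩, h3⟩⟩
    exact ⟨s, hs, h1, h2, h3⟩
  · rintro ⟨s, hs, h1, h2, h3⟩
    exact ⟨s, hs, ⟨h1, h2⟩, h3⟩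

lemma rho_isSome_of (cs : List Char) (bags : List (List String)) {i j c : Nat}
    (h : rleB cs bags i j c = true) : ∃ i0, rho cs bags c j = some i0 ∧ i0 ≤ i := by
  unfold rho
  rw [dif_pos (rleB_to_len cs bags i j c h)]
  exact ⟨_, rfl, Nat.find_min' _ h⟩

lemma getD_ne_nil_lt (bags : List (List String)) {b : Nat} {s : String}
    (hs : s ∈ bags.getD b []) : b < bags.length := by
  by_contra hb
  rw [List.getD_eq_getElem?_getD, List.getElem?_eq_none (by omega)] at hs
  cases hs

lemma cands_iff (cs : List Char) (bags : List (List String)) (c : Nat)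
    (r : PySem.Dict Nat Nat)
    (hInv : ∀ j, PySem.Dict.get? r j = rho cs bags c j) (hnd : r.keys.Nodup) (b x : Nat) :
    b ∈ candsB cs cs.length bags.length bags r.items x ↔
      ∃ s ∈ bags.getD b [], condR cs x s = true ∧
        rleB cs bags b (x - s.toList.length) c = true := by
  constructor
  · intro hb
    simp only [candsB, List.mem_flatMap, List.mem_filter] at hb
    rcases hb with ⟨⟨j0, i0⟩, hji, hmem, hhit⟩
    have hget : PySem.Dict.get? r j0 = some i0 :=
      PySem.Dict.get?_of_mem_items _ hji hnd
    have hrange := List.mem_range'_1.mp hmem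
    have hji2 : i0 ≤ b ∧ b < bags.length := by simp only at hrange; omega
    rw [hInv j0, rho_some_iff] at hget
    have hrb : rleB cs bags b j0 c = true := rleB_mono_i cs bags hji2.1 j0 c hget.1
    rcases (hitB_iff cs cs.length j0 (bags.getD b []) x).mp hhit with ⟨s, hs, hlen, hmatch, hx⟩
    refine ⟨s, hs, ?_, ?_⟩
    · simp only [condR, matchB, Bool.and_eq_true, decide_eq_true_eq]
      constructor
      · omega
      · have : x - s.toList.length = j0 := by omega
        rw [this]
        exact hmatch
    · have : x - s.toList.length = j0 := by omega
      rw [this]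
      exact hrb
  · rintro ⟨s, hs, hcond, hr⟩
    simp only [condR, matchB, Bool.and_eq_true, decide_eq_true_eq] at hcond
    obtain ⟨i0, hi0, hi0b⟩ := rho_isSome_of cs bags hr
    have hjn : x - s.toList.length ≤ cs.length := by
      rcases (rleB_iff cs bags b (x - s.toList.length) c).mp hr with ⟨v, hv, _⟩
      exact Dfam_le_n cs bags b _ v hv
    have hbB : b < bags.length := getD_ne_nil_lt bags hs
    have hsl := matchB_len cs (x - s.toList.length) s (by
      simp only [matchB, decide_eq_true_eq]; exact hcond.2)
    simp only [candsB, List.mem_flatMap, List.mem_filter]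
    have hget : PySem.Dict.get? r (x - s.toList.length) = some i0 := by
      rw [hInv]
      exact hi0
    refine ⟨(x - s.toList.length, i0), ?_, ?_, ?_⟩
    · exact PySem.Dict.mem_items_of_get?_eq_some _ hget
    · rw [List.mem_range'_1]
      omega
    · rw [hitB_iff]
      exact ⟨s, hs, by omega, hcond.2, by omega⟩

-- ----- one-step unrolling of the cost-≤ predicate -----
lemma rleB_succ_iff (cs : List Char) (bags : List (List String)) :
    ∀ (i x c : Nat), rleB cs bags i x (c + 1) = true ↔
      (rleB cs bags i x c = true ∨
        ∃ b < i, ∃ s ∈ bags.getD b [], condR cs x s = true ∧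
          rleB cs bags b (x - s.toList.length) c = true) := by
  intro i
  induction i with
  | zero =>
    intro x c
    constructor
    · intro h
      left
      rw [rleB_iff] at h ⊢
      rcases h with ⟨v, hv, _⟩
      have := Dfam_bound cs bags 0 x v hv
      exact ⟨v, hv, by omega⟩
    · rintro (h | ⟨b, hb, _⟩)
      · exact rleB_mono_c cs bags 0 x (Nat.le_succ c) h
      · omega
  | succ i ih =>
    intro x c
    have hL : rleB cs bags (i + 1) x (c + 1) = true ↔
        (rleB cs bags i x (c + 1) = true ∨
          ∃ s ∈ bags.getD i [], condR cs x s = true ∧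
            rleB cs bags i (x - s.toList.length) c = true) := by
      rw [rleB_iff]
      show (∃ v, relax cs (Dfam cs bags i) (bags.getD i []) x = some v ∧ v ≤ ((c + 1 : Nat) : Int)) ↔ _
      rw [relax_some_le_iff]
      refine or_congr ?_ ?_
      · rw [rleB_iff]
      · refine exists_congr fun s => and_congr Iff.rfl (and_congr Iff.rfl ?_)
        rw [rleB_iff]
        refine exists_congr fun v => and_congr Iff.rfl ?_
        push_cast
        omega
    rw [hL, ih x c]
    constructor
    · rintro ((h | ⟨b, hb, s, hs, hc', hr⟩) | ⟨s, hs, hc', hr⟩)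
      · exact Or.inl (rleB_succ cs bags i x c h)
      · exact Or.inr ⟨b, by omega, s, hs, hc', hr⟩
      · exact Or.inr ⟨i, by omega, s, hs, hc', hr⟩
    · rintro (h | ⟨b, hb, s, hs, hc', hr⟩)
      · -- rleB (i+1) x c: unroll one relax step at cost c
        have h' : (∃ v, relax cs (Dfam cs bags i) (bags.getD i []) x = some v ∧ v ≤ (c : Int)) :=
          (rleB_iff cs bags (i + 1) x c).mp h
        rw [relax_some_le_iff] at h'
        rcases h' with ⟨v, hv, hvc⟩ | ⟨s, hs, hc', v, hv, hvc⟩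
        · exact Or.inl (Or.inl ((rleB_iff cs bags i x c).mpr ⟨v, hv, hvc⟩))
        · exact Or.inr ⟨s, hs, hc', (rleB_iff cs bags i _ c).mpr ⟨v, hv, by omega⟩⟩
      · rcases Nat.lt_or_ge b i with hbi | hbi
        · exact Or.inl (Or.inr ⟨b, hbi, s, hs, hc', hr⟩)
        · have hbe : b = i := by omega
          subst hbe
          exact Or.inr ⟨s, hs, hc', hr⟩

-- ----- the crux: one BFS level advances rho by one cost unit -----
lemma step_rho (cs : List Char) (bags : List (List String)) (c : Nat)
    (r : PySem.Dict Nat Nat)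
    (hInv : ∀ j, PySem.Dict.get? r j = rho cs bags c j) (hnd : r.keys.Nodup) (x : Nat) :
    PySem.Dict.get? (bStep cs cs.length bags.length bags r) x = rho cs bags (c + 1) x := by
  rw [bStep_get?, hInv x]
  cases hrho : rho cs bags (c + 1) x with
  | none =>
    rw [rho_none_iff] at hrho
    have ho : rho cs bags c x = none := by
      rw [rho_none_iff]
      intro i
      cases hb : rleB cs bags i x c
      · rfl
      · have := rleB_mono_c cs bags i x (Nat.le_succ c) hb
        rw [hrho i] at this
        cases this
    have hL : candsB cs cs.length bags.length bags r.items x = [] := by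
      rw [List.eq_nil_iff_forall_not_mem]
      intro b hb
      rw [cands_iff cs bags c r hInv hnd] at hb
      rcases hb with ⟨s, hs, hc', hr⟩
      have : rleB cs bags (b + 1) x (c + 1) = true :=
        (rleB_succ_iff cs bags (b + 1) x c).mpr (Or.inr ⟨b, by omega, s, hs, hc', hr⟩)
      rw [hrho (b + 1)] at this
      cases this
    rw [ho, hL, mfold_nil]
  | some m =>
    rw [rho_some_iff] at hrho
    obtain ⟨hm, hmin⟩ := hrho
    rw [mfold_some_iff]
    refine ⟨?_, ?_, ?_⟩
    · rcases (rleB_succ_iff cs bags m x c).mp hm with h | ⟨b, hb, s, hs, hc', hr⟩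
      · left
        rw [rho_some_iff]
        refine ⟨h, fun i hi => ?_⟩
        cases hbi : rleB cs bags i x c
        · rfl
        · have := rleB_mono_c cs bags i x (Nat.le_succ c) hbi
          rw [hmin i hi] at this
          cases this
      · right
        have h1 : rleB cs bags (b + 1) x (c + 1) = true :=
          (rleB_succ_iff cs bags (b + 1) x c).mpr (Or.inr ⟨b, by omega, s, hs, hc', hr⟩)
        have h2 : ¬ (b + 1 < m) := fun hlt => by rw [hmin _ hlt] at h1; cases h1
        refine ⟨b, ?_, by omega⟩
        rw [cands_iff cs bags c r hInv hnd]
        exact ⟨s, hs, hc', hr⟩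
    · intro w hw
      rw [rho_some_iff] at hw
      have h1 := rleB_mono_c cs bags w x (Nat.le_succ c) hw.1
      have h2 : ¬ (w < m) := fun hlt => by rw [hmin _ hlt] at h1; cases h1
      omega
    · intro b hbL
      rw [cands_iff cs bags c r hInv hnd] at hbL
      rcases hbL with ⟨s, hs, hc', hr⟩
      have h1 : rleB cs bags (b + 1) x (c + 1) = true :=
        (rleB_succ_iff cs bags (b + 1) x c).mpr (Or.inr ⟨b, by omega, s, hs, hc', hr⟩)
      have h2 : ¬ (b + 1 < m) := fun hlt => by rw [hmin _ hlt] at h1; cases h1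
      omega

-- ----- the initial dict is rho at cost 0 -----
lemma init_inv (cs : List Char) (bags : List (List String)) :
    ∀ j, PySem.Dict.get? ((PySem.Dict.empty : PySem.Dict Nat Nat).insert 0 0) j
      = rho cs bags 0 j := by
  intro j
  rw [PySem.Dict.get?_insert]
  by_cases hj : j = 0
  · subst hj
    rw [if_pos rfl]
    symm
    rw [rho_some_iff]
    refine ⟨?_, fun i hi => by omega⟩
    rw [rleB_iff]
    exact ⟨0, by simp [Dfam, initF], by norm_num⟩
  · rw [if_neg hj, PySem.Dict.get?_empty]
    symm
    rw [rho_none_iff]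
    intro i
    cases hb : rleB cs bags i j 0
    · rfl
    · exact absurd (rleB_zero cs bags i j hb) hj

-- ----- driving the level loop -----
lemma driver (cs : List Char) (bags : List (List String)) :
    ∀ (fuel c : Nat) (r : PySem.Dict Nat Nat),
    (∀ j, PySem.Dict.get? r j = rho cs bags c j) → r.keys.Nodup →
    (∀ v, Dfam cs bags bags.length cs.length = some v → (c : Int) ≤ v) →
    bIter cs cs.length bags.length bags fuel c r
      = match Dfam cs bags bags.length cs.length with
        | none => -1
        | some v => if v < (c : Int) + (fuel : Int) then v else -1 := by
  intro fuel
  induction fuel with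
  | zero =>
    intro c r _ _ hlow
    show (-1 : Int) = _
    cases hD : Dfam cs bags bags.length cs.length with
    | none => rfl
    | some v =>
      dsimp only
      rw [if_neg (show ¬ v < (c : Int) + ((0 : Nat) : Int) by have := hlow v hD; push_cast; omega)]
  | succ fuel ih =>
    intro c r hInv hnd hlow
    show (if (PySem.Dict.get? r cs.length).isSome then (c : Int)
        else bIter cs cs.length bags.length bags fuel (c + 1) (bStep cs cs.length bags.length bags r)) = _
    rw [hInv cs.length]
    cases hD : Dfam cs bags bags.length cs.length with
    | none =>
      have hnone : rho cs bags c cs.length = none := by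
        rw [rho_none_iff]
        intro i
        cases hb : rleB cs bags i cs.length c
        · rfl
        · have := rleB_to_len cs bags i cs.length c hb
          rw [rleB_iff] at this
          rcases this with ⟨v, hv, _⟩
          rw [hD] at hv
          cases hv
      rw [hnone]
      simp only [Option.isSome_none, Bool.false_eq_true, if_false]
      rw [ih (c + 1) _ (step_rho cs bags c r hInv hnd) (bStep_nodup cs cs.length bags.length bags r hnd)
        (by intro v hv; rw [hD] at hv; cases hv)]
      rw [hD]
    | some v =>
      have hv0 := hlow v hD
      by_cases hvc : v ≤ (c : Int)
      · have hr : rleB cs bags bags.length cs.length c = true :=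
          (rleB_iff cs bags bags.length cs.length c).mpr ⟨v, hD, hvc⟩
        have hsome : rho cs bags c cs.length
            = some (Nat.find (⟨bags.length, hr⟩ : ∃ i, rleB cs bags i cs.length c = true)) := by
          unfold rho
          rw [dif_pos hr]
        rw [hsome]
        simp only [Option.isSome_some, if_true]
        rw [if_pos (show v < (c : Int) + ((fuel + 1 : Nat) : Int) by push_cast; omega)]
        omega
      · have hnone : rho cs bags c cs.length = none := by
          rw [rho_none_iff]
          intro i
          cases hb : rleB cs bags i cs.length c
          · rfl
          · have := rleB_to_len cs bags i cs.length c hb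
            rw [rleB_iff] at this
            rcases this with ⟨w, hw, hwc⟩
            rw [hD] at hw
            cases hw
            exact absurd hwc hvc
        rw [hnone]
        simp only [Option.isSome_none, Bool.false_eq_true, if_false]
        rw [ih (c + 1) _ (step_rho cs bags c r hInv hnd) (bStep_nodup cs cs.length bags.length bags r hnd)
          (by intro w hw; rw [hD] at hw; cases hw; push_cast; omega)]
        rw [hD]
        have hcast : ((c + 1 : Nat) : Int) + (fuel : Int) = (c : Int) + ((fuel + 1 : Nat) : Int) := by
          push_cast
          ring
        rw [hcast]

-- ===== VERDICT (by name: the statement is the Claim_ definition above) =====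
theorem min_cost_to_form_string_spec : Claim_equal_min_cost_to_form_string := by
  intro t bags _
  unfold Spec_min_cost_to_form_string
  have hA : min_cost_to_form_string t bags
      = match get2 (aIter t.toList t.toList.length bags bags.length) bags.length t.toList.length with
        | some c => c
        | none => -1 := rfl
  have h1 : get2 (aIter t.toList t.toList.length bags bags.length) bags.length t.toList.length
      = Dfam t.toList bags bags.length t.toList.length := by
    have h := (aInv t.toList t.toList.length bags bags.length le_rfl).2.2 t.toList.length le_rfl
    rw [h]
    exact (Dfam_eq_take t.toList bags bags.length t.toList.length).symm
  have hB : min_cost_to_form_string_alt t bags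
      = bIter t.toList t.toList.length bags.length bags (bags.length + 1) 0
          ((PySem.Dict.empty).insert 0 0) := rfl
  rw [hA, hB, h1]
  rw [driver t.toList bags (bags.length + 1) 0 _ (init_inv t.toList bags)
    (PySem.Dict.nodup_keys_insert _ 0 0 PySem.Dict.nodup_keys_empty)
    (fun v hv => by have := Dfam_bound t.toList bags bags.length t.toList.length v hv; omega)]
  cases hD : Dfam t.toList bags bags.length t.toList.length with
  | none => rfl
  | some v =>
    have hb := Dfam_bound t.toList bags bags.length t.toList.length v hD
    dsimp only
    rw [if_pos (show v < ((0 : Nat) : Int) + ((bags.length + 1 : Nat) : Int) by push_cast; omega)]
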